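-- pv_equiv track=rewrite | github.com/Mervat36/movie-sizzling | AI/Scene_Segmentation/smart_scene_detection.py | group_scenes
-- ===== SOURCE A (Python) =====
-- def group_scenes(shot_ids, boundaries):
--     """Group shots into scenes"""
--     scenes = []
--     curr = []
--     bset = set(boundaries)
--
--     for sid in shot_ids:
--         if sid in bset and curr:
--             scenes.append(curr)
--             curr = []
--         curr.append(sid)
--
--     if curr:
--         scenes.append(curr)
--
--     return scenes
-- ===== SOURCE B (Python) =====
-- def group_scenes(shot_ids, boundaries):
--     """Group shots into scenes"""
--     if not shot_ids:
--         return []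
--     bset = set(boundaries)
--     cuts = [0] + [i for i, s in enumerate(shot_ids) if i > 0 and s in bset] + [len(shot_ids)]
--     return [shot_ids[a:b] for a, b in zip(cuts, cuts[1:])]
-- ===== Notes on version B (the rewrite author's own statement) =====
-- stated objective: alternative
-- what changed: Replaces the streaming scenes/curr accumulator loop with a two-phase computation: first build the table of split indices (positions i>0 whose shot id is a boundary), then emit each scene as one slice between consecutive cut points.
import Mathlib
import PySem

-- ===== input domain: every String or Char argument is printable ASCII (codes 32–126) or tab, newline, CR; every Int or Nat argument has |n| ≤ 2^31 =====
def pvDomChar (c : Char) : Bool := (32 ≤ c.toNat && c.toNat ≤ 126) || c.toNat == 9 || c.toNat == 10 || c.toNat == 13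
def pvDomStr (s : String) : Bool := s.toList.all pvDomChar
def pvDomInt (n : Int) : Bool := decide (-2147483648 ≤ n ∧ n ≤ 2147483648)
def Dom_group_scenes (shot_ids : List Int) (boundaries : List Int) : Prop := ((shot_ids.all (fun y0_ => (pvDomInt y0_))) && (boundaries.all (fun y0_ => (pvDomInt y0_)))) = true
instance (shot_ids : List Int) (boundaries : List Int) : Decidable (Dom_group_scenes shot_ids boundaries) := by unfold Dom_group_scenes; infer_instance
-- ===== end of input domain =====

-- B builds the table of split indices and slices between consecutive cuts instead of streaming an accumulator; same cost, different decomposition.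

-- ===== PORT A =====
def group_scenes (shot_ids : List Int) (boundaries : List Int) : List (List Int) :=
  let bset : PySem.Set Int := PySem.Set.ofList boundaries
  let r := shot_ids.foldl
    (fun (st : List (List Int) × List Int) sid =>
      if bset.contains sid ∧ st.2 ≠ [] then (st.1 ++ [st.2], [sid])
      else (st.1, st.2 ++ [sid]))
    ([], [])
  if r.2 ≠ [] then r.1 ++ [r.2] else r.1

-- ===== PORT B =====
def group_scenes_alt (shot_ids : List Int) (boundaries : List Int) : List (List Int) :=
  if shot_ids = [] then []
  else
    let bset : PySem.Set Int := PySem.Set.ofList boundaries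
    let cuts : List Int :=
      0 :: ((PySem.List.enumerate shot_ids 0).filter
              (fun q => decide (0 < q.1) && bset.contains q.2)).map (·.1)
        ++ [(shot_ids.length : Int)]
    (cuts.zip cuts.tail).map (fun ab => PySem.List.slice shot_ids (some ab.1) (some ab.2))

-- ===== PRECONDITION & SPEC =====
def Spec_group_scenes (shot_ids : List Int) (boundaries : List Int) (out : List (List Int)) : Prop := out = group_scenes_alt shot_ids boundaries
instance (shot_ids : List Int) (boundaries : List Int) (out : List (List Int)) : Decidable (Spec_group_scenes shot_ids boundaries out) := by unfold Spec_group_scenes; infer_instance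

-- ===== CLAIM (what is proved, stated in full; the proofs are below) =====
def Claim_equal_group_scenes : Prop := ∀ (shot_ids : List Int) (boundaries : List Int), Dom_group_scenes shot_ids boundaries → Spec_group_scenes shot_ids boundaries (group_scenes shot_ids boundaries)

-- ===== LEMMAS AND PROOFS =====

/-- Reference chunking: `runG p curr ys` is the list of scenes produced when `curr`
(nonempty) is the scene under construction and `ys` the remaining shots. -/
def runG (p : Int → Bool) (curr : List Int) : List Int → List (List Int)
  | [] => [curr]
  | y :: ys => if p y then curr :: runG p [y] ys else runG p (curr ++ [y]) ys

/-- Split indices of `ys` counted from start index `s`. -/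
def gIdx (p : Int → Bool) (s : Int) : List Int → List Int
  | [] => []
  | y :: ys => if p y then s :: gIdx p (s + 1) ys else gIdx p (s + 1) ys

/-- Slices of `l` between consecutive cut points, starting at `a`. -/
def slGo (l : List Int) (a : Int) : List Int → List (List Int)
  | [] => []
  | b :: rest => PySem.List.slice l (some a) (some b) :: slGo l b rest

def consHead (x : Int) : List (List Int) → List (List Int)
  | [] => []
  | s :: ss => (x :: s) :: ss

-- A's loop equals the reference chunking.
lemma foldA (p : Int → Bool) (ys : List Int) :
    ∀ (scenes : List (List Int)) (curr : List Int), curr ≠ [] →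
      (let r := ys.foldl
        (fun (st : List (List Int) × List Int) sid =>
          if p sid ∧ st.2 ≠ [] then (st.1 ++ [st.2], [sid]) else (st.1, st.2 ++ [sid]))
        (scenes, curr)
       ; r.2 ≠ [] ∧ r.1 ++ [r.2] = scenes ++ runG p curr ys) := by
  induction ys with
  | nil => intro scenes curr h; exact ⟨h, by simp [runG]⟩
  | cons y ys ih =>
    intro scenes curr h
    simp only [List.foldl_cons]
    by_cases hp : p y = true
    · rw [if_pos (And.intro hp h)]
      obtain ⟨h1, h2⟩ := ih (scenes ++ [curr]) [y] (by simp)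
      refine ⟨h1, ?_⟩
      rw [h2, List.append_assoc]
      simp [runG, hp]
    · rw [if_neg (fun hc => hp hc.1)]
      obtain ⟨h1, h2⟩ := ih scenes (curr ++ [y]) (by simp)
      refine ⟨h1, ?_⟩
      rw [h2]
      simp [runG, hp]

lemma gIdx_shift (p : Int → Bool) (ys : List Int) :
    ∀ s : Int, gIdx p (s + 1) ys = (gIdx p s ys).map (· + 1) := by
  induction ys with
  | nil => intro s; simp [gIdx]
  | cons y ys ih =>
    intro s
    simp only [gIdx, ih (s + 1)]
    by_cases hp : p y = true <;> simp [hp]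

lemma gIdx_nonneg (p : Int → Bool) (ys : List Int) :
    ∀ s : Int, ∀ b ∈ gIdx p s ys, s ≤ b := by
  induction ys with
  | nil => intro s b hb; simp [gIdx] at hb
  | cons y ys ih =>
    intro s b hb
    simp only [gIdx] at hb
    by_cases hp : p y = true
    · rw [if_pos hp] at hb
      rcases List.mem_cons.mp hb with h | h
      · omega
      · have := ih (s + 1) b h; omega
    · rw [if_neg hp] at hb
      have := ih (s + 1) b hb; omega

-- enumerate-filter-map form equals gIdx (from start index ≥ 1 the `0 < i` test is vacuous).
lemma enum_gIdx (p : Int → Bool) (ys : List Int) :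
    ∀ s : Int, 1 ≤ s →
      ((PySem.List.enumerate ys s).filter (fun q => decide (0 < q.1) && p q.2)).map (·.1)
        = gIdx p s ys := by
  induction ys with
  | nil => intro s _; simp [PySem.List.enumerate_nil, gIdx]
  | cons y ys ih =>
    intro s hs
    rw [PySem.List.enumerate_cons]
    have h0 : decide (0 < s) = true := by simp; omega
    by_cases hp : p y = true
    · rw [List.filter_cons_of_pos (by rw [h0, hp]; rfl)]
      simp only [List.map_cons, gIdx]
      rw [if_pos hp, ih (s + 1) (by omega)]
    · rw [List.filter_cons_of_neg (by simp [hp])]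
      simp only [gIdx]
      rw [if_neg hp, ih (s + 1) (by omega)]

-- zip-with-tail mapping is slGo.
lemma zip_slGo (l : List Int) (rest : List Int) :
    ∀ a : Int, (((a :: rest).zip rest).map (fun ab => PySem.List.slice l (some ab.1) (some ab.2)))
      = slGo l a rest := by
  induction rest with
  | nil => intro a; simp [slGo]
  | cons b r ih => intro a; simp only [List.zip_cons_cons, List.map_cons, slGo]; rw [ih b]

lemma slice_shift (x : Int) (l : List Int) (a b : Int) (ha : 0 ≤ a) (hb : 0 ≤ b) :
    PySem.List.slice (x :: l) (some (a + 1)) (some (b + 1)) = PySem.List.slice l (some a) (some b) := by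
  rw [PySem.List.slice_toNat _ (by omega) (by omega), PySem.List.slice_toNat _ ha hb]
  have h1 : (a + 1).toNat = a.toNat + 1 := by omega
  have h2 : (b + 1).toNat = b.toNat + 1 := by omega
  rw [h1, h2]
  simp [List.drop_succ_cons, Nat.add_sub_add_right]

lemma slice_cons_zero (x : Int) (l : List Int) (b : Int) (hb : 0 ≤ b) :
    PySem.List.slice (x :: l) (some 0) (some (b + 1)) = x :: PySem.List.slice l (some 0) (some b) := by
  rw [PySem.List.slice_toNat _ (by omega) (by omega), PySem.List.slice_toNat _ (by omega) hb]
  have h2 : (b + 1).toNat = b.toNat + 1 := by omega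
  simp [h2]

lemma slGo_shift (x : Int) (l : List Int) (cs : List Int) :
    ∀ a : Int, 0 ≤ a → (∀ b ∈ cs, 0 ≤ b) →
      slGo (x :: l) (a + 1) (cs.map (· + 1)) = slGo l a cs := by
  induction cs with
  | nil => intro a _ _; simp [slGo]
  | cons b r ih =>
    intro a ha hcs
    have hb : 0 ≤ b := hcs b (by simp)
    simp only [List.map_cons, slGo]
    rw [slice_shift x l a b ha hb, ih b hb (fun c hc => hcs c (by simp [hc]))]

lemma runG_consHead (p : Int → Bool) (ys : List Int) :
    ∀ (a : Int) (c : List Int), runG p (a :: c) ys = consHead a (runG p c ys) := by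
  induction ys with
  | nil => intro a c; simp [runG, consHead]
  | cons y ys ih =>
    intro a c
    by_cases hp : p y = true
    · simp only [runG]; rw [if_pos hp, if_pos hp]; simp [consHead]
    · simp only [runG]; rw [if_neg hp, if_neg hp]
      have h1 : (a :: c) ++ [y] = a :: (c ++ [y]) := by simp
      rw [h1, ih a (c ++ [y])]

-- Key recursion: slicing between cut points reproduces the reference chunking.
lemma slGo_runG (p : Int → Bool) (xs : List Int) :
    ∀ x : Int, slGo (x :: xs) 0 (gIdx p 1 xs ++ [((x :: xs).length : Int)]) = runG p [x] xs := by
  induction xs with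
  | nil =>
    intro x
    simp only [gIdx, List.nil_append, slGo, runG, List.length_cons, List.length_nil]
    rw [PySem.List.slice_toNat _ (by omega) (by omega)]
    simp
  | cons y ys ih =>
    intro x
    have hlen : (((x :: y :: ys).length : Int)) = (((y :: ys).length : Int)) + 1 := by
      push_cast [List.length_cons]; ring
    have hshift := gIdx_shift p ys 1
    have hnn : ∀ b ∈ gIdx p 1 ys ++ [(((y :: ys).length : Int))], 0 ≤ b := by
      intro b hb
      rcases List.mem_append.mp hb with h | h
      · have := gIdx_nonneg p ys 1 b h; omega
      · simp at h; omega
    by_cases hp : p y = true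
    · have hg : gIdx p 1 (y :: ys) = 1 :: gIdx p (1 + 1) ys := by
        simp only [gIdx]; rw [if_pos hp]
      rw [hg, hshift]
      have e1 : ((1 : Int) :: (gIdx p 1 ys).map (· + 1)) ++ [((x :: y :: ys).length : Int)]
          = 1 :: ((gIdx p 1 ys ++ [(((y :: ys).length : Int))]).map (· + 1)) := by
        rw [hlen]; simp
      rw [e1]
      simp only [slGo]
      have e2 : PySem.List.slice (x :: y :: ys) (some 0) (some 1) = [x] := by
        rw [PySem.List.slice_toNat _ (by omega) (by omega)]; simp
      rw [e2]
      have hsh := slGo_shift x (y :: ys) (gIdx p 1 ys ++ [(((y :: ys).length : Int))]) 0 (by omega) hnn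
      rw [show (0 : Int) + 1 = 1 from by norm_num] at hsh
      rw [hsh, ih y]
      simp [runG, hp]
    · have hg : gIdx p 1 (y :: ys) = gIdx p (1 + 1) ys := by
        simp only [gIdx]; rw [if_neg hp]
      rw [hg, hshift]
      have e1 : ((gIdx p 1 ys).map (· + 1)) ++ [((x :: y :: ys).length : Int)]
          = ((gIdx p 1 ys ++ [(((y :: ys).length : Int))]).map (· + 1)) := by
        rw [hlen]; simp
      rw [e1]
      have key : ∀ (cs : List Int), (∀ b ∈ cs, 0 ≤ b) → cs ≠ [] →
          slGo (x :: y :: ys) 0 (cs.map (· + 1)) = consHead x (slGo (y :: ys) 0 cs) := by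
        intro cs hcs hne
        cases cs with
        | nil => exact absurd rfl hne
        | cons b r =>
          have hb : 0 ≤ b := hcs b (by simp)
          simp only [List.map_cons, slGo, consHead]
          rw [slice_cons_zero x (y :: ys) b hb,
              slGo_shift x (y :: ys) r b hb (fun c hc => hcs c (by simp [hc]))]
      rw [key _ hnn (by simp), ih y, ← runG_consHead p ys x [y]]
      have h2 : runG p [x] (y :: ys) = runG p ([x] ++ [y]) ys := by
        simp only [runG]; rw [if_neg hp]
      rw [h2]
      rfl

-- ===== VERDICT (by name: the statement is the Claim_ definition above) =====
theorem group_scenes_spec : Claim_equal_group_scenes := by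
  intro shot_ids boundaries _
  show group_scenes shot_ids boundaries = group_scenes_alt shot_ids boundaries
  cases shot_ids with
  | nil => simp [group_scenes, group_scenes_alt]
  | cons x xs =>
    have hA : group_scenes (x :: xs) boundaries
        = runG (PySem.Set.contains (PySem.Set.ofList boundaries)) [x] xs := by
      unfold group_scenes
      simp only [List.foldl_cons]
      rw [if_neg (show ¬((PySem.Set.ofList boundaries).contains x = true ∧ ([] : List Int) ≠ []) from by simp)]
      simp only [List.nil_append]
      obtain ⟨h1, h2⟩ := foldA (PySem.Set.contains (PySem.Set.ofList boundaries)) xs [] [x] (by simp)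
      rw [if_pos h1, h2]
      simp
    have hB : group_scenes_alt (x :: xs) boundaries
        = runG (PySem.Set.contains (PySem.Set.ofList boundaries)) [x] xs := by
      unfold group_scenes_alt
      rw [if_neg (by simp)]
      simp only
      rw [PySem.List.enumerate_cons]
      rw [List.filter_cons_of_neg (by simp)]
      rw [show (0 : Int) + 1 = 1 from by norm_num]
      rw [enum_gIdx (PySem.Set.contains (PySem.Set.ofList boundaries)) xs 1 (by omega)]
      rw [List.cons_append, List.tail_cons]
      rw [zip_slGo (x :: xs) _ 0, slGo_runG (PySem.Set.contains (PySem.Set.ofList boundaries)) xs x]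
    rw [hA, hB]
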